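-- pv_equiv track=rewrite | github.com/richardchavira/stationexec | stationexec/sequencer/utilities.py | find_graph_entry_exit
-- ===== SOURCE A (Python) =====
-- def find_graph_entry_exit(matrix):
--     entry_nodes = []
--     exit_nodes = []
--
--     # Node is an Entry Node (nothing comes before it) if the row for that node is all 0
--     for row in matrix:
--         row_truth_values = [path for path in matrix[row] if matrix[row][path] is True]
--         col_truth_values = [path for path in matrix[row] if matrix[path][row] is True]
--         row_has_zero_true_values = len(row_truth_values) == 0
--         col_has_zero_true_values = len(col_truth_values) == 0
--         if row_has_zero_true_values:
--             # Row is an entry node - no true values in the path matrix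
--             entry_nodes.append(row)
--         if col_has_zero_true_values:
--             # Col is an exit node - no true values in the path matrix
--             exit_nodes.append(row)
--
--     return entry_nodes, exit_nodes
-- ===== SOURCE B (Python) =====
-- def _silent_rows(matrix):
--     # nodes whose row has no True value
--     return [r for r, row in matrix.items() if not any(v is True for v in row.values())]
--
--
-- def _transpose(matrix):
--     # reverse the edge direction, keeping each row restricted to its own path keys
--     return {r: {p: matrix[p][r] for p in matrix[r]} for r in matrix}
--
--
-- def find_graph_entry_exit(matrix):
--     # entry nodes = silent rows; exit nodes = entry nodes of the transposed graph
--     return _silent_rows(matrix), _silent_rows(_transpose(matrix))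
-- ===== Notes on version B (the rewrite author's own statement) =====
-- stated objective: simpler
-- what changed: B reduces the exit-node computation to the entry-node computation on a materialised transposed matrix: one shared 'silent rows' helper applied to the matrix and to its transpose, instead of A's single loop that builds two filtered truth-value lists per row and appends on their emptiness.
import Mathlib
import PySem

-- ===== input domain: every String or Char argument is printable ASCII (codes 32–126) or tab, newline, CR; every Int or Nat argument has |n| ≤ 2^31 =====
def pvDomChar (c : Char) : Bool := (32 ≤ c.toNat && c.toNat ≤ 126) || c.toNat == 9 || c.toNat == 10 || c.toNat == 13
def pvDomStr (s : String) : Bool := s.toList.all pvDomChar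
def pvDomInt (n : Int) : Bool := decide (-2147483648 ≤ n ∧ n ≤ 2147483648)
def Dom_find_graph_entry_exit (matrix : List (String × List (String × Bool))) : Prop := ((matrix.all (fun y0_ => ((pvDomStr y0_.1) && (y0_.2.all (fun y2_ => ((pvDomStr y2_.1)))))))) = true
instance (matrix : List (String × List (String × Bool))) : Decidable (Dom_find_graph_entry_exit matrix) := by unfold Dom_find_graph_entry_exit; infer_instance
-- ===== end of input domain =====

-- B materialises the transposed matrix and computes both answers with one shared
-- "silent rows" helper — exit nodes are the entry nodes of the transpose ("simpler";
-- no speed claim).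

-- ===== PORT A =====
-- matrix[k] (dict lookup of a row; inside Pre_ the key is always present)
def fgRow (matrix : List (String × List (String × Bool))) (k : String) : List (String × Bool) :=
  (List.lookup k matrix).getD []
-- row[k] (dict lookup of a truth value; inside Pre_ the key is present where A reads it)
def fgVal (row : List (String × Bool)) (k : String) : Bool :=
  (List.lookup k row).getD false

def find_graph_entry_exit (matrix : List (String × List (String × Bool))) : List String × List String :=
  matrix.foldl
    (fun acc rp =>
      let row := rp.1
      let row_truth_values := ((fgRow matrix row).filter (fun pv => fgVal (fgRow matrix row) pv.1)).map (·.1)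
      let col_truth_values := ((fgRow matrix row).filter (fun pv => fgVal (fgRow matrix pv.1) row)).map (·.1)
      let acc1 := if row_truth_values.length == 0 then acc.1 ++ [row] else acc.1
      let acc2 := if col_truth_values.length == 0 then acc.2 ++ [row] else acc.2
      (acc1, acc2))
    ([], [])

-- ===== PORT B =====
-- _silent_rows: keys of the rows holding no True value
def fgSilentRows (matrix : List (String × List (String × Bool))) : List String :=
  (matrix.filter (fun rp => !(rp.2.any (fun pv => pv.2)))).map (·.1)

-- _transpose: {r: {p: matrix[p][r] for p in matrix[r]} for r in matrix}
def fgTranspose (matrix : List (String × List (String × Bool))) : List (String × List (String × Bool)) :=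
  matrix.map (fun rp =>
    (rp.1, (fgRow matrix rp.1).map (fun pv => (pv.1, fgVal (fgRow matrix pv.1) rp.1))))

def find_graph_entry_exit_alt (matrix : List (String × List (String × Bool))) : List String × List String :=
  (fgSilentRows matrix, fgSilentRows (fgTranspose matrix))

-- ===== PRECONDITION & SPEC =====
-- Pre_ excludes (a) association lists with duplicate outer or inner keys, which are not
-- valid encodings of A's dict argument, and (b) matrices where some row mentions a path
-- node p that is missing from the matrix or whose own row lacks the entry for the current
-- node, on which A raises KeyError at matrix[path] / matrix[path][row].
def Pre_find_graph_entry_exit (matrix : List (String × List (String × Bool))) : Prop :=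
  (matrix.map (·.1)).Nodup ∧
  ∀ rp ∈ matrix, (rp.2.map (·.1)).Nodup ∧
    ∀ pv ∈ rp.2, (List.lookup pv.1 matrix).isSome ∧
      rp.1 ∈ ((List.lookup pv.1 matrix).getD []).map (·.1)
instance (matrix : List (String × List (String × Bool))) : Decidable (Pre_find_graph_entry_exit matrix) := by unfold Pre_find_graph_entry_exit; infer_instance

def pvWitness_find_graph_entry_exit : (List (String × List (String × Bool))) :=
  [("a", [("a", false), ("b", true)]), ("b", [("a", true), ("b", false)])]

def Spec_find_graph_entry_exit (matrix : List (String × List (String × Bool))) (out : List String × List String) : Prop := out = find_graph_entry_exit_alt matrix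
instance (matrix : List (String × List (String × Bool))) (out : List String × List String) : Decidable (Spec_find_graph_entry_exit matrix out) := by unfold Spec_find_graph_entry_exit; infer_instance

-- ===== CLAIM (what is proved, stated in full; the proofs are below) =====
def Claim_equal_find_graph_entry_exit : Prop := ∀ (matrix : List (String × List (String × Bool))), Dom_find_graph_entry_exit matrix → Pre_find_graph_entry_exit matrix → Spec_find_graph_entry_exit matrix (find_graph_entry_exit matrix)

-- ===== LEMMAS AND PROOFS =====

-- A's pair-accumulator loop is a pair of filters over the key list.
theorem fg_foldl_pair (l : List (String × List (String × Bool)))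
    (f g : String → Bool) (a b : List String) :
    l.foldl (fun acc rp =>
        (if f rp.1 then acc.1 ++ [rp.1] else acc.1,
         if g rp.1 then acc.2 ++ [rp.1] else acc.2)) (a, b)
      = (a ++ (l.map (·.1)).filter f, b ++ (l.map (·.1)).filter g) := by
  induction l generalizing a b with
  | nil => simp
  | cons x xs ih =>
    simp only [List.foldl_cons, List.map_cons, List.filter_cons]
    rw [ih]
    by_cases hf : f x.1 <;> by_cases hg : g x.1 <;> simp [hf, hg]

theorem fg_lookup_eq_some_of_nodup {β : Type} (l : List (String × β)) (k : String) (v : β)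
    (hnd : (l.map (·.1)).Nodup) (hm : (k, v) ∈ l) : List.lookup k l = some v := by
  induction l with
  | nil => simp at hm
  | cons x xs ih =>
    simp only [List.map_cons, List.nodup_cons] at hnd
    rcases List.mem_cons.mp hm with h | h
    · subst h; simp [List.lookup]
    · have hk : k ≠ x.1 := by
        intro he
        exact hnd.1 (by simpa [← he] using List.mem_map_of_mem (f := (·.1)) h)
      simp [List.lookup, show (k == x.1) = false by simpa using hk]
      exact ih hnd.2 h

theorem fg_beq_isEmpty {α : Type} (l : List α) : (l.length == 0) = l.isEmpty := by
  cases l <;> simp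

theorem fg_isEmpty_filter {α : Type} (l : List α) (p : α → Bool) :
    (l.filter p).isEmpty = !l.any p := by
  induction l with
  | nil => rfl
  | cons x t ih => by_cases h : p x <;> simp [h, ih]

-- a key-indexed filter of the key list equals filtering the pairs, when the
-- key-level predicate matches the pair-level one on every element
theorem fg_filter_map_key {β : Type} (l : List (String × β))
    (q : String × β → Bool) (f : String → Bool)
    (h : ∀ rp ∈ l, f rp.1 = q rp) :
    (l.map (·.1)).filter f = (l.filter q).map (·.1) := by
  induction l with
  | nil => rfl
  | cons x xs ih =>
    have hx := h x (List.mem_cons_self)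
    have ihs := ih (fun rp hrp => h rp (List.mem_cons_of_mem _ hrp))
    by_cases hq : q x
    · simp [hq, hx ▸ hq, ihs]
    · have : f x.1 = false := by rw [hx]; simpa using hq
      simp [hq, this, ihs]

-- A's entry predicate on a key of the matrix is B's silent-row test on its row
theorem fg_entry_pt (m : List (String × List (String × Bool)))
    (hp : Pre_find_graph_entry_exit m) (rp : String × List (String × Bool))
    (hm : rp ∈ m) :
    ((((fgRow m rp.1).filter (fun pv => fgVal (fgRow m rp.1) pv.1)).map (·.1)).length == 0)
      = !(rp.2.any (fun pv => pv.2)) := by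
  obtain ⟨hnd, hrows⟩ := hp
  have hl : List.lookup rp.1 m = some rp.2 :=
    fg_lookup_eq_some_of_nodup m rp.1 rp.2 hnd (by cases rp; exact hm)
  have hrow : fgRow m rp.1 = rp.2 := by simp [fgRow, hl]
  have hrnd : (rp.2.map (·.1)).Nodup := (hrows rp hm).1
  have hfe : rp.2.filter (fun pv => fgVal rp.2 pv.1) = rp.2.filter (fun pv => pv.2) := by
    apply List.filter_congr
    intro pv hpv
    simp [fgVal, fg_lookup_eq_some_of_nodup rp.2 pv.1 pv.2 hrnd (by cases pv; exact hpv)]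
  rw [hrow, hfe, fg_beq_isEmpty, List.isEmpty_map, fg_isEmpty_filter]

-- A's exit predicate on a key is B's silent-row test on the transposed row
theorem fg_exit_pt (m : List (String × List (String × Bool)))
    (rp : String × List (String × Bool)) :
    ((((fgRow m rp.1).filter (fun pv => fgVal (fgRow m pv.1) rp.1)).map (·.1)).length == 0)
      = !(((fgRow m rp.1).map (fun pv => (pv.1, fgVal (fgRow m pv.1) rp.1))).any
            (fun pv => pv.2)) := by
  rw [fg_beq_isEmpty, List.isEmpty_map, fg_isEmpty_filter, List.any_map]
  rfl

-- ===== VERDICT (by name: the statement is the Claim_ definition above) =====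
theorem find_graph_entry_exit_spec : Claim_equal_find_graph_entry_exit := by
  intro m _hdom hp
  unfold Spec_find_graph_entry_exit
  have hA := fg_foldl_pair m
      (fun n => ((((fgRow m n).filter (fun pv => fgVal (fgRow m n) pv.1)).map (·.1)).length == 0))
      (fun n => ((((fgRow m n).filter (fun pv => fgVal (fgRow m pv.1) n)).map (·.1)).length == 0))
      [] []
  have hA' : find_graph_entry_exit m
      = ((m.map (·.1)).filter (fun n => ((((fgRow m n).filter (fun pv => fgVal (fgRow m n) pv.1)).map (·.1)).length == 0)),
         (m.map (·.1)).filter (fun n => ((((fgRow m n).filter (fun pv => fgVal (fgRow m pv.1) n)).map (·.1)).length == 0))) := by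
    simpa using hA
  rw [hA']
  unfold find_graph_entry_exit_alt fgSilentRows fgTranspose
  refine Prod.ext ?_ ?_
  · exact fg_filter_map_key m _ _ (fun rp hrp => fg_entry_pt m hp rp hrp)
  · have hkeys : (m.map (fun rp =>
        (rp.1, (fgRow m rp.1).map (fun pv => (pv.1, fgVal (fgRow m pv.1) rp.1))))).map (·.1)
          = m.map (·.1) := by
      rw [List.map_map]; rfl
    rw [show ((List.map (fun x => x.1) m : List String)) = (m.map (fun rp =>
        (rp.1, (fgRow m rp.1).map (fun pv => (pv.1, fgVal (fgRow m pv.1) rp.1))))).map (·.1)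
      from hkeys.symm]
    refine fg_filter_map_key
      (m.map (fun rp =>
        (rp.1, (fgRow m rp.1).map (fun pv => (pv.1, fgVal (fgRow m pv.1) rp.1))))) _ _ ?_
    intro tp htp
    obtain ⟨rp, hrp, rfl⟩ := List.mem_map.mp htp
    exact fg_exit_pt m rp
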